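-- pv_equiv track=rewrite | github.com/julianaviola98/puzzles | my_solutions/puzzle02/partysmart.py | alternativeBestTimeToPartySmart
-- ===== SOURCE A (Python) =====
-- def alternativeBestTimeToPartySmart(schedule):
--     maxCount = 0
--     bestTime = 0
--     for x in schedule:
--         startTime = x[0]
--         count = 0
--         for y in schedule:
--             if startTime >= y[0] and startTime < y[1]:
--                 count += 1
--         if count > maxCount:
--             maxCount = count
--             bestTime = startTime
--     print ('Best time to attend the party is at', bestTime,\
--            'o\'clock', ':', maxCount, 'celebrities will be attending!')
--     return bestTime
-- ===== SOURCE B (Python) =====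
-- def _bisect_right(a, x):
--     # insertion point after any entries equal to x, on a sorted list (hand-written: no imports allowed)
--     lo, hi = 0, len(a)
--     while lo < hi:
--         mid = (lo + hi) // 2
--         if x < a[mid]:
--             hi = mid
--         else:
--             lo = mid + 1
--     return lo
--
--
-- def alternativeBestTimeToPartySmart(schedule):
--     # keep only intervals that can cover anything (start < end); an interval with
--     # start >= end covers no time point, so it never contributes to a count
--     proper = [x for x in schedule if x[0] < x[1]]
--     starts = sorted(x[0] for x in proper)
--     ends = sorted(x[1] for x in proper)
--     maxCount = 0
--     bestTime = 0
--     for x in schedule: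
--         s = x[0]
--         # intervals covering s = (#starts <= s) - (#ends <= s)
--         count = _bisect_right(starts, s) - _bisect_right(ends, s)
--         if count > maxCount:
--             maxCount = count
--             bestTime = s
--     print ('Best time to attend the party is at', bestTime,\
--            'o\'clock', ':', maxCount, 'celebrities will be attending!')
--     return bestTime
-- ===== Notes on version B (the rewrite author's own statement) =====
-- stated objective: faster
-- what changed: Replaces the quadratic nested scan (for each start, rescan all intervals) by sorting the interval start and end times once and computing each candidate's coverage as bisect_right(starts,s) - bisect_right(ends,s) via binary search.
import Mathlib
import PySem

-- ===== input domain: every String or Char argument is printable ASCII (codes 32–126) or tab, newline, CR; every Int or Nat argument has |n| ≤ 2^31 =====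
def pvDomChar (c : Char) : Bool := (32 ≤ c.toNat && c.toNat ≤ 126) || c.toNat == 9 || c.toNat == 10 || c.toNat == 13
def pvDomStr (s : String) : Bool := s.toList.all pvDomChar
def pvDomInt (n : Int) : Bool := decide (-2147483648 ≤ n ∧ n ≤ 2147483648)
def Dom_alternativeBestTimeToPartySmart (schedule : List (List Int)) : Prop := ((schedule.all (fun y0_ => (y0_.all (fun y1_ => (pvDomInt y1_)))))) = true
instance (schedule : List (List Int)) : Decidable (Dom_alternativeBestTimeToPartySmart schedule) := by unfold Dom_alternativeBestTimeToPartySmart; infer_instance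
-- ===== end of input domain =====

-- B replaces A's quadratic nested scan by sorted start/end lists and binary search
-- (bisect_right), keeping A's tie-breaking; both versions also print a message
-- (a side effect not modelled here) — the equivalence proved is about the return value.

-- ===== PORT A =====
def alternativeBestTimeToPartySmart (schedule : List (List Int)) : Int :=
  (schedule.foldl (fun (st : Int × Int) x =>
      let startTime := PySem.List.pyGetD x 0 0
      let count := schedule.foldl (fun (c : Int) y =>
          if PySem.List.pyGetD y 0 0 ≤ startTime ∧ startTime < PySem.List.pyGetD y 1 0
          then c + 1 else c) 0
      if st.1 < count then (count, startTime) else st) ((0 : Int), (0 : Int))).2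

-- ===== PORT B =====
def alternativeBestTimeToPartySmart_alt (schedule : List (List Int)) : Int :=
  let proper := schedule.filter (fun x => decide (PySem.List.pyGetD x 0 0 < PySem.List.pyGetD x 1 0))
  let starts := PySem.List.sorted (proper.map (fun x => PySem.List.pyGetD x 0 0)) (fun t => t) false
  let ends := PySem.List.sorted (proper.map (fun x => PySem.List.pyGetD x 1 0)) (fun t => t) false
  (schedule.foldl (fun (st : Int × Int) x =>
      let s := PySem.List.pyGetD x 0 0
      let count : Int := (PySem.List.bisectRight starts s : Int) - (PySem.List.bisectRight ends s : Int)
      if st.1 < count then (count, s) else st) ((0 : Int), (0 : Int))).2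

-- ===== PRECONDITION & SPEC =====
-- A indexes x[0] and y[1] on every row, so it raises IndexError unless every row has length ≥ 2.
def Pre_alternativeBestTimeToPartySmart (schedule : List (List Int)) : Prop :=
  ∀ x ∈ schedule, 2 ≤ x.length
instance (schedule : List (List Int)) : Decidable (Pre_alternativeBestTimeToPartySmart schedule) := by
  unfold Pre_alternativeBestTimeToPartySmart; infer_instance

def pvWitness_alternativeBestTimeToPartySmart : List (List Int) := [[1, 3], [2, 4]]

def Spec_alternativeBestTimeToPartySmart (schedule : List (List Int)) (out : Int) : Prop := out = alternativeBestTimeToPartySmart_alt schedule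
instance (schedule : List (List Int)) (out : Int) : Decidable (Spec_alternativeBestTimeToPartySmart schedule out) := by unfold Spec_alternativeBestTimeToPartySmart; infer_instance

-- ===== CLAIM (what is proved, stated in full; the proofs are below) =====
def Claim_equal_alternativeBestTimeToPartySmart : Prop := ∀ (schedule : List (List Int)), Dom_alternativeBestTimeToPartySmart schedule → Pre_alternativeBestTimeToPartySmart schedule → Spec_alternativeBestTimeToPartySmart schedule (alternativeBestTimeToPartySmart schedule)

-- ===== LEMMAS AND PROOFS =====

-- bisect_right on a sorted list counts the elements ≤ s
theorem pv_bisect_countP (xs : List Int) (s : Int)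
    (h : xs.Pairwise (fun a b => a ≤ b)) :
    PySem.List.bisectRight xs s = xs.countP (fun t => decide (t ≤ s)) := by
  obtain ⟨hk, hlt, hge⟩ := PySem.List.bisectRight_spec xs s h
  set k := PySem.List.bisectRight xs s with hkdef
  have hsplit : xs = xs.take k ++ xs.drop k := (List.take_append_drop k xs).symm
  rw [hsplit, List.countP_append]
  have h1 : (xs.take k).countP (fun t => decide (t ≤ s)) = k := by
    rw [List.countP_eq_length.mpr, List.length_take, Nat.min_eq_left hk]
    intro a ha
    obtain ⟨j, hj, rfl⟩ := List.mem_iff_getElem.mp ha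
    rw [List.getElem_take]
    have hjk : j < k := lt_of_lt_of_le hj (by simp [List.length_take])
    exact decide_eq_true (hlt j (by omega) hjk)
  have h2 : (xs.drop k).countP (fun t => decide (t ≤ s)) = 0 := by
    rw [List.countP_eq_zero]
    intro a ha
    obtain ⟨j, hj, rfl⟩ := List.mem_iff_getElem.mp ha
    rw [List.getElem_drop]
    simp only [decide_eq_true_eq, not_le]
    exact hge (k + j) (by simpa [Nat.add_comm] using Nat.add_lt_of_lt_sub (by simpa [List.length_drop] using hj)) (by omega)
  omega

-- A's inner counting loop is a countP
theorem pv_foldl_countP (l : List (List Int)) (s : Int) (c0 : Int) :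
    l.foldl (fun (c : Int) y =>
        if PySem.List.pyGetD y 0 0 ≤ s ∧ s < PySem.List.pyGetD y 1 0 then c + 1 else c) c0
      = c0 + (l.countP (fun y => decide (PySem.List.pyGetD y 0 0 ≤ s) && decide (s < PySem.List.pyGetD y 1 0)) : Int) := by
  induction l generalizing c0 with
  | nil => simp
  | cons y t ih =>
    rw [List.foldl_cons, List.countP_cons, ih]
    simp only [Bool.and_eq_true, decide_eq_true_eq]
    split_ifs <;> push_cast <;> omega

-- the counting identity: covering count = (#proper starts ≤ s) - (#proper ends ≤ s)
theorem pv_count_identity (l : List (List Int)) (s : Int) :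
    l.countP (fun y => decide (PySem.List.pyGetD y 0 0 ≤ s) && decide (s < PySem.List.pyGetD y 1 0))
      + l.countP (fun y => decide (PySem.List.pyGetD y 1 0 ≤ s) && decide (PySem.List.pyGetD y 0 0 < PySem.List.pyGetD y 1 0))
      = l.countP (fun y => decide (PySem.List.pyGetD y 0 0 ≤ s) && decide (PySem.List.pyGetD y 0 0 < PySem.List.pyGetD y 1 0)) := by
  induction l with
  | nil => simp
  | cons y t ih =>
    simp only [List.countP_cons, Bool.and_eq_true, decide_eq_true_eq]
    split_ifs <;> omega

-- B's per-candidate count equals A's inner loop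
theorem pv_counts_eq (schedule : List (List Int)) (s : Int) :
    schedule.foldl (fun (c : Int) y =>
        if PySem.List.pyGetD y 0 0 ≤ s ∧ s < PySem.List.pyGetD y 1 0 then c + 1 else c) 0
      = (PySem.List.bisectRight (PySem.List.sorted ((schedule.filter (fun x => decide (PySem.List.pyGetD x 0 0 < PySem.List.pyGetD x 1 0))).map (fun x => PySem.List.pyGetD x 0 0)) (fun t => t) false) s : Int)
        - (PySem.List.bisectRight (PySem.List.sorted ((schedule.filter (fun x => decide (PySem.List.pyGetD x 0 0 < PySem.List.pyGetD x 1 0))).map (fun x => PySem.List.pyGetD x 1 0)) (fun t => t) false) s : Int) := by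
  rw [pv_foldl_countP, zero_add]
  rw [pv_bisect_countP _ s (by simpa using PySem.List.sorted_pairwise _ (fun t : Int => t)),
      pv_bisect_countP _ s (by simpa using PySem.List.sorted_pairwise _ (fun t : Int => t))]
  rw [(PySem.List.sorted_perm _ _ _).countP_eq, (PySem.List.sorted_perm _ _ _).countP_eq]
  rw [List.countP_map, List.countP_map, List.countP_filter, List.countP_filter]
  simp only [Function.comp]
  have := pv_count_identity schedule s
  omega

-- the two selection folds agree (per-candidate counts coincide)
theorem pv_fold_eq (schedule l : List (List Int)) (st : Int × Int) :
    l.foldl (fun (st : Int × Int) x =>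
        let startTime := PySem.List.pyGetD x 0 0
        let count := schedule.foldl (fun (c : Int) y =>
            if PySem.List.pyGetD y 0 0 ≤ startTime ∧ startTime < PySem.List.pyGetD y 1 0
            then c + 1 else c) 0
        if st.1 < count then (count, startTime) else st) st
      = l.foldl (fun (st : Int × Int) x =>
        let s := PySem.List.pyGetD x 0 0
        let count : Int := (PySem.List.bisectRight (PySem.List.sorted ((schedule.filter (fun x => decide (PySem.List.pyGetD x 0 0 < PySem.List.pyGetD x 1 0))).map (fun x => PySem.List.pyGetD x 0 0)) (fun t => t) false) s : Int)
          - (PySem.List.bisectRight (PySem.List.sorted ((schedule.filter (fun x => decide (PySem.List.pyGetD x 0 0 < PySem.List.pyGetD x 1 0))).map (fun x => PySem.List.pyGetD x 1 0)) (fun t => t) false) s : Int)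
        if st.1 < count then (count, s) else st) st := by
  induction l generalizing st with
  | nil => rfl
  | cons x t ih =>
    simp only [List.foldl_cons]
    rw [← pv_counts_eq schedule (PySem.List.pyGetD x 0 0)]
    exact ih _

-- ===== VERDICT (by name: the statement is the Claim_ definition above) =====
theorem alternativeBestTimeToPartySmart_spec : Claim_equal_alternativeBestTimeToPartySmart := by
  intro schedule _ _
  unfold Spec_alternativeBestTimeToPartySmart alternativeBestTimeToPartySmart alternativeBestTimeToPartySmart_alt
  rw [pv_fold_eq]
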